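-- pv_equiv track=rewrite | github.com/Shantanugupta1118/200-Days-Code-Challenge | Day 55/Concentric Square Grid.py | concentric_grid
-- ===== SOURCE A (Python) =====
-- def concentric_grid(n):
--     grid = n*2 - 1
--     dp = [[0 for x in range(grid)] for x in range(grid)]
--     for i in range(grid):
--         for j in range(grid):
--             if abs(i-(n-1)) > abs(j - (n-1)):
--                 dp[i][j] = abs(i-(n-1)) + 1
--             else:
--                 dp[i][j] = abs(j-(n-1)) + 1
--     return dp
-- ===== SOURCE B (Python) =====
-- def concentric_grid(n):
--     size = 2 * n - 1
--     dp = [[0] * size for _ in range(size)]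
--     c = n - 1
--     for d in range(n):
--         lo, hi = c - d, c + d
--         for j in range(lo, hi + 1):
--             dp[lo][j] = d + 1
--             dp[hi][j] = d + 1
--         for i in range(lo, hi + 1):
--             dp[i][lo] = d + 1
--             dp[i][hi] = d + 1
--     return dp
-- ===== Notes on version B (the rewrite author's own statement) =====
-- stated objective: alternative
-- what changed: B allocates the zero grid and paints it ring by ring (for each Chebyshev radius d it writes d+1 along the border rows and columns of the concentric square), instead of A's row-major per-cell comparison of the two absolute distances.
import Mathlib
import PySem

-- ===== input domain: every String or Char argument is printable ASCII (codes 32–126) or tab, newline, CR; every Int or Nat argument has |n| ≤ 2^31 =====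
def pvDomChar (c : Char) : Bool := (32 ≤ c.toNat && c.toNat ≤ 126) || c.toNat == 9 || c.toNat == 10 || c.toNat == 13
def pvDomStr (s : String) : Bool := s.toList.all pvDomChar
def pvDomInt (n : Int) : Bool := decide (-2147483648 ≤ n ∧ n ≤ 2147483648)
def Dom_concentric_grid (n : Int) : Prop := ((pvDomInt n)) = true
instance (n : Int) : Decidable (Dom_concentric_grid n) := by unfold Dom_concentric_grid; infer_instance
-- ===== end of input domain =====

-- B paints the grid ring by ring (value d+1 on the border of the concentric square of radius d)
-- instead of A's per-cell max-of-abs formula in row-major order; alternative decomposition, same O(n^2) work.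

-- ===== PORT A =====
-- dp[i][j] = v  (Python list-of-lists assignment; every index reached here is nonnegative and in range)
def pvWrite (dp : List (List Int)) (i j v : Int) : List (List Int) :=
  dp.modify i.toNat (fun r => r.set j.toNat v)

def concentric_grid (n : Int) : List (List Int) :=
  let grid := n * 2 - 1
  let dp := (PySem.List.pyRange 0 grid 1).map (fun _ =>
    (PySem.List.pyRange 0 grid 1).map (fun _ => (0 : Int)))
  (PySem.List.pyRange 0 grid 1).foldl (fun dp i =>
    (PySem.List.pyRange 0 grid 1).foldl (fun dp j =>
      if |i - (n - 1)| > |j - (n - 1)| then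
        pvWrite dp i j (|i - (n - 1)| + 1)
      else
        pvWrite dp i j (|j - (n - 1)| + 1)) dp) dp

-- ===== PORT B =====
def concentric_grid_alt (n : Int) : List (List Int) :=
  let size := 2 * n - 1
  let dp := (PySem.List.pyRange 0 size 1).map (fun _ => List.replicate size.toNat (0 : Int))
  let c := n - 1
  (PySem.List.pyRange 0 n 1).foldl (fun dp d =>
    let lo := c - d
    let hi := c + d
    let dp := (PySem.List.pyRange lo (hi + 1) 1).foldl (fun dp j =>
      pvWrite (pvWrite dp lo j (d + 1)) hi j (d + 1)) dp
    (PySem.List.pyRange lo (hi + 1) 1).foldl (fun dp i =>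
      pvWrite (pvWrite dp i lo (d + 1)) i hi (d + 1)) dp) dp

-- ===== PRECONDITION & SPEC =====
def Spec_concentric_grid (n : Int) (out : List (List Int)) : Prop := out = concentric_grid_alt n
instance (n : Int) (out : List (List Int)) : Decidable (Spec_concentric_grid n out) := by unfold Spec_concentric_grid; infer_instance

-- ===== CLAIM (what is proved, stated in full; the proofs are below) =====
def Claim_equal_concentric_grid : Prop := ∀ (n : Int), Dom_concentric_grid n → Spec_concentric_grid n (concentric_grid n)

-- ===== LEMMAS AND PROOFS =====

-- cell (a,b) of the grid (0 outside); both ports only read/write in range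
def pvCell (dp : List (List Int)) (a b : Nat) : Int := (dp.getD a []).getD b 0

-- dp is a rectangular s × s grid
def pvRect (s : Nat) (dp : List (List Int)) : Prop :=
  dp.length = s ∧ ∀ (k : Nat) (h : k < dp.length), dp[k].length = s

-- the value A assigns to cell (i,j)
def pvF (n i j : Int) : Int :=
  if |i - (n - 1)| > |j - (n - 1)| then |i - (n - 1)| + 1 else |j - (n - 1)| + 1

-- canonical write step: write pvF at the given coordinates
def pvStep (n : Int) (dp : List (List Int)) (p : Int × Int) : List (List Int) :=
  pvWrite dp p.1 p.2 (pvF n p.1 p.2)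

-- A's write order: all cells, row major
def pvPairsA (n : Int) : List (Int × Int) :=
  (PySem.List.pyRange 0 (n * 2 - 1) 1).flatMap (fun i =>
    (PySem.List.pyRange 0 (n * 2 - 1) 1).map (fun j => (i, j)))

-- B's write order for ring d
def pvRing (n d : Int) : List (Int × Int) :=
  ((PySem.List.pyRange (n - 1 - d) (n - 1 + d + 1) 1).flatMap (fun j =>
    [(n - 1 - d, j), (n - 1 + d, j)])) ++
  ((PySem.List.pyRange (n - 1 - d) (n - 1 + d + 1) 1).flatMap (fun i =>
    [(i, n - 1 - d), (i, n - 1 + d)]))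

def pvPairsB (n : Int) : List (Int × Int) :=
  (PySem.List.pyRange 0 n 1).flatMap (pvRing n)

lemma pvFoldl_flatMap {α β : Type} (g : α → List β) (f : List (List Int) → β → List (List Int))
    (init : List (List Int)) (l : List α) :
    (l.flatMap g).foldl f init = l.foldl (fun acc x => (g x).foldl f acc) init := by
  induction l generalizing init with
  | nil => rfl
  | cons x t ih => simp [List.flatMap_cons, List.foldl_append, ih]

lemma pvRect_write (s : Nat) (dp : List (List Int)) (i j v : Int) (h : pvRect s dp) :
    pvRect s (pvWrite dp i j v) := by
  obtain ⟨h1, h2⟩ := h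
  refine ⟨by simpa [pvWrite] using h1, ?_⟩
  intro k hk
  simp only [pvWrite] at hk ⊢
  rw [List.getElem_modify]
  split
  · rw [List.length_set]; exact h2 k (by simpa using hk)
  · exact h2 k (by simpa using hk)

lemma pvCell_write (s : Nat) (dp : List (List Int)) (i j v : Int) (a b : Nat)
    (hre : pvRect s dp) (hi0 : 0 ≤ i) (_hi : i < (s : Int)) (hj0 : 0 ≤ j) (_hj : j < (s : Int))
    (ha : a < s) (hb : b < s) :
    pvCell (pvWrite dp i j v) a b = if i = (a : Int) ∧ j = (b : Int) then v else pvCell dp a b := by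
  obtain ⟨h1, h2⟩ := hre
  have ha' : a < dp.length := by omega
  have hla : dp[a].length = s := h2 a ha'
  have houter : (pvWrite dp i j v).getD a []
      = if i.toNat = a then dp[a].set j.toNat v else dp[a] := by
    unfold pvWrite
    rw [List.getD_eq_getElem _ _ (by simpa using ha'), List.getElem_modify]
  have e1 : pvCell (pvWrite dp i j v) a b
      = if i.toNat = a then (dp[a].set j.toNat v).getD b 0 else dp[a].getD b 0 := by
    unfold pvCell
    rw [houter]
    split <;> rfl
  have e2 : pvCell dp a b = (dp[a]'ha').getD b 0 := by
    unfold pvCell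
    rw [List.getD_eq_getElem _ _ ha']
  rw [e1, e2]
  by_cases hia : i.toNat = a
  · rw [if_pos hia]
    have hb1 : b < (dp[a].set j.toNat v).length := by rw [List.length_set]; omega
    have hb2 : b < dp[a].length := by omega
    rw [List.getD_eq_getElem _ _ hb1, List.getD_eq_getElem _ _ hb2, List.getElem_set]
    split_ifs with h3 h4 h4 <;> first | rfl | omega
  · rw [if_neg hia, if_neg (by omega)]

lemma pvCell_foldl_step (n : Int) (s : Nat) (ws : List (Int × Int)) (dp : List (List Int))
    (hre : pvRect s dp)
    (hws : ∀ p ∈ ws, 0 ≤ p.1 ∧ p.1 < (s : Int) ∧ 0 ≤ p.2 ∧ p.2 < (s : Int))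
    (a b : Nat) (ha : a < s) (hb : b < s) :
    pvCell (ws.foldl (pvStep n) dp) a b =
      if ((a : Int), (b : Int)) ∈ ws then pvF n a b else pvCell dp a b := by
  induction ws generalizing dp with
  | nil => simp
  | cons p t ih =>
    obtain ⟨hp1, hp2, hp3, hp4⟩ := hws p List.mem_cons_self
    have hre' : pvRect s (pvStep n dp p) := pvRect_write s dp p.1 p.2 _ hre
    rw [List.foldl_cons, ih _ hre' (fun q hq => hws q (List.mem_cons_of_mem _ hq))]
    by_cases hmem : ((a : Int), (b : Int)) ∈ t
    · rw [if_pos hmem, if_pos (List.mem_cons_of_mem _ hmem)]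
    · rw [if_neg hmem]
      unfold pvStep
      rw [pvCell_write s dp p.1 p.2 _ a b hre hp1 hp2 hp3 hp4 ha hb]
      by_cases hpe : p.1 = (a : Int) ∧ p.2 = (b : Int)
      · rw [if_pos hpe, if_pos (by
          obtain ⟨x, y⟩ := hpe
          exact List.mem_cons.2 (Or.inl (by cases p; simp_all))), hpe.1, hpe.2]
      · rw [if_neg hpe, if_neg (by
          rw [List.mem_cons]
          rintro (h | h)
          · exact hpe (by cases p; simp_all)
          · exact hmem h)]

lemma pvRect_foldl_step (n : Int) (s : Nat) (ws : List (Int × Int)) (dp : List (List Int))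
    (hre : pvRect s dp) : pvRect s (ws.foldl (pvStep n) dp) := by
  induction ws generalizing dp with
  | nil => exact hre
  | cons p t ih => exact ih _ (pvRect_write s dp p.1 p.2 _ hre)

-- the common initial grid
def pvZero (s : Nat) : List (List Int) := List.replicate s (List.replicate s (0 : Int))

lemma pvRect_zero (s : Nat) : pvRect s (pvZero s) := by
  constructor
  · simp [pvZero]
  · intro k hk; simp [pvZero] at hk ⊢

-- A's port in canonical form
lemma pvA_canon (n : Int) :
    concentric_grid n = (pvPairsA n).foldl (pvStep n) (pvZero (n * 2 - 1).toNat) := by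
  unfold concentric_grid pvPairsA
  rw [pvFoldl_flatMap]
  simp only [List.foldl_map]
  have hbody : ∀ (dp : List (List Int)) (i j : Int),
      (if |i - (n - 1)| > |j - (n - 1)| then pvWrite dp i j (|i - (n - 1)| + 1)
       else pvWrite dp i j (|j - (n - 1)| + 1)) = pvStep n dp (i, j) := by
    intro dp i j
    unfold pvStep pvF
    rw [apply_ite (pvWrite dp i j)]
  simp only [hbody]
  have hinit : ((PySem.List.pyRange 0 (n * 2 - 1) 1).map (fun _ =>
      (PySem.List.pyRange 0 (n * 2 - 1) 1).map (fun _ => (0 : Int)))) = pvZero (n * 2 - 1).toNat := by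
    unfold pvZero
    simp [List.map_const', PySem.List.length_pyRange_one]
  rw [hinit]

lemma pvF_eq_ring (n d i j : Int) (hd : 0 ≤ d)
    (hij : (i = n - 1 - d ∨ i = n - 1 + d) ∧ n - 1 - d ≤ j ∧ j ≤ n - 1 + d ∨
           (j = n - 1 - d ∨ j = n - 1 + d) ∧ n - 1 - d ≤ i ∧ i ≤ n - 1 + d) :
    pvF n i j = d + 1 := by
  unfold pvF
  rcases abs_cases (i - (n - 1)) with ⟨e1, f1⟩ | ⟨e1, f1⟩ <;>
    rcases abs_cases (j - (n - 1)) with ⟨e2, f2⟩ | ⟨e2, f2⟩ <;>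
      rw [e1, e2] <;> split_ifs <;> omega

-- B's port in canonical form
lemma pvB_canon (n : Int) :
    concentric_grid_alt n = (pvPairsB n).foldl (pvStep n) (pvZero (n * 2 - 1).toNat) := by
  unfold concentric_grid_alt
  rw [show (2 * n - 1 : Int) = n * 2 - 1 from by ring]
  have hinit : ((PySem.List.pyRange 0 (n * 2 - 1) 1).map (fun _ =>
      List.replicate (n * 2 - 1).toNat (0 : Int))) = pvZero (n * 2 - 1).toNat := by
    unfold pvZero
    simp [List.map_const', PySem.List.length_pyRange_one]
  simp only [pvPairsB, pvFoldl_flatMap, hinit]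
  apply PySem.List.foldl_congr_mem'
  intro d hd dp
  rw [PySem.List.mem_pyRange_one] at hd
  have hrow : ∀ dp : List (List Int),
      (PySem.List.pyRange (n - 1 - d) (n - 1 + d + 1) 1).foldl (fun dp j =>
        ([(n - 1 - d, j), (n - 1 + d, j)] : List (Int × Int)).foldl (pvStep n) dp) dp
      = (PySem.List.pyRange (n - 1 - d) (n - 1 + d + 1) 1).foldl (fun dp j =>
        pvWrite (pvWrite dp (n - 1 - d) j (d + 1)) (n - 1 + d) j (d + 1)) dp := by
    intro dp
    apply PySem.List.foldl_congr_mem'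
    intro j hj dp'
    rw [PySem.List.mem_pyRange_one] at hj
    simp only [List.foldl_cons, List.foldl_nil]
    unfold pvStep
    rw [pvF_eq_ring n d (n - 1 - d) j hd.1 (by omega),
      pvF_eq_ring n d (n - 1 + d) j hd.1 (by omega)]
  have hcol : ∀ dp : List (List Int),
      (PySem.List.pyRange (n - 1 - d) (n - 1 + d + 1) 1).foldl (fun dp i =>
        ([(i, n - 1 - d), (i, n - 1 + d)] : List (Int × Int)).foldl (pvStep n) dp) dp
      = (PySem.List.pyRange (n - 1 - d) (n - 1 + d + 1) 1).foldl (fun dp i =>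
        pvWrite (pvWrite dp i (n - 1 - d) (d + 1)) i (n - 1 + d) (d + 1)) dp := by
    intro dp
    apply PySem.List.foldl_congr_mem'
    intro i hi dp'
    rw [PySem.List.mem_pyRange_one] at hi
    simp only [List.foldl_cons, List.foldl_nil]
    unfold pvStep
    rw [pvF_eq_ring n d i (n - 1 - d) hd.1 (by omega),
      pvF_eq_ring n d i (n - 1 + d) hd.1 (by omega)]
  unfold pvRing
  rw [List.foldl_append, pvFoldl_flatMap, pvFoldl_flatMap, hrow, hcol]

lemma pvPairsA_bounds (n : Int) (p : Int × Int) (hp : p ∈ pvPairsA n) :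
    0 ≤ p.1 ∧ p.1 < n * 2 - 1 ∧ 0 ≤ p.2 ∧ p.2 < n * 2 - 1 := by
  simp only [pvPairsA, List.mem_flatMap, List.mem_map, PySem.List.mem_pyRange_one] at hp
  obtain ⟨i, hi, j, hj, rfl⟩ := hp
  exact ⟨hi.1, hi.2, hj.1, hj.2⟩

lemma pvPairsB_bounds (n : Int) (p : Int × Int) (hp : p ∈ pvPairsB n) :
    0 ≤ p.1 ∧ p.1 < n * 2 - 1 ∧ 0 ≤ p.2 ∧ p.2 < n * 2 - 1 := by
  simp only [pvPairsB, pvRing, List.mem_flatMap, List.mem_append, List.mem_cons,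
    List.not_mem_nil, or_false, PySem.List.mem_pyRange_one] at hp
  obtain ⟨d, hd, h⟩ := hp
  rcases h with ⟨j, hj, h | h⟩ | ⟨i, hi, h | h⟩ <;> subst h <;>
    refine ⟨?_, ?_, ?_, ?_⟩ <;> dsimp only <;> omega

lemma pvPairsA_mem (n : Int) (a b : Nat) (ha : (a : Int) < n * 2 - 1) (hb : (b : Int) < n * 2 - 1) :
    ((a : Int), (b : Int)) ∈ pvPairsA n := by
  simp only [pvPairsA, List.mem_flatMap, List.mem_map, PySem.List.mem_pyRange_one]
  exact ⟨(a : Int), ⟨by omega, ha⟩, ⟨(b : Int), ⟨by omega, hb⟩, rfl⟩⟩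

lemma pvPairsB_mem (n : Int) (a b : Nat) (ha : (a : Int) < n * 2 - 1) (hb : (b : Int) < n * 2 - 1) :
    ((a : Int), (b : Int)) ∈ pvPairsB n := by
  simp only [pvPairsB, pvRing, List.mem_flatMap, List.mem_append, List.mem_cons,
    List.not_mem_nil, or_false, PySem.List.mem_pyRange_one, Prod.ext_iff]
  set da := |(a : Int) - (n - 1)| with hda_def
  set db := |(b : Int) - (n - 1)| with hdb_def
  have hda : 0 ≤ da ∧ ((a : Int) = n - 1 - da ∨ (a : Int) = n - 1 + da) := by
    rcases abs_cases ((a : Int) - (n - 1)) with ⟨e, f⟩ | ⟨e, f⟩ <;> constructor <;> omega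
  have hdb : 0 ≤ db ∧ ((b : Int) = n - 1 - db ∨ (b : Int) = n - 1 + db) := by
    rcases abs_cases ((b : Int) - (n - 1)) with ⟨e, f⟩ | ⟨e, f⟩ <;> constructor <;> omega
  by_cases hab : db ≤ da
  · refine ⟨da, ⟨by omega, by omega⟩, Or.inl ⟨(b : Int), ⟨by omega, by omega⟩, ?_⟩⟩
    rcases hda.2 with h | h
    · exact Or.inl ⟨by omega, rfl⟩
    · exact Or.inr ⟨by omega, rfl⟩
  · refine ⟨db, ⟨by omega, by omega⟩, Or.inr ⟨(a : Int), ⟨by omega, by omega⟩, ?_⟩⟩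
    rcases hdb.2 with h | h
    · exact Or.inl ⟨rfl, by omega⟩
    · exact Or.inr ⟨rfl, by omega⟩

lemma pvRect_ext (s : Nat) (X Y : List (List Int)) (hX : pvRect s X) (hY : pvRect s Y)
    (h : ∀ a b, a < s → b < s → pvCell X a b = pvCell Y a b) : X = Y := by
  apply List.ext_getElem (hX.1.trans hY.1.symm)
  intro k h1 h2
  apply List.ext_getElem (by rw [hX.2 k h1, hY.2 k h2])
  intro m hm1 hm2
  have hc := h k m (hX.1 ▸ h1) (hX.2 k h1 ▸ hm1)
  unfold pvCell at hc
  rwa [List.getD_eq_getElem _ _ h1, List.getD_eq_getElem _ _ hm1,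
    List.getD_eq_getElem _ _ h2, List.getD_eq_getElem _ _ hm2] at hc

-- ===== VERDICT (by name: the statement is the Claim_ definition above) =====
theorem concentric_grid_spec : Claim_equal_concentric_grid := by
  intro n _
  unfold Spec_concentric_grid
  rw [pvA_canon, pvB_canon]
  set s : Nat := (n * 2 - 1).toNat with hs
  apply pvRect_ext s
  · exact pvRect_foldl_step n s _ _ (pvRect_zero s)
  · exact pvRect_foldl_step n s _ _ (pvRect_zero s)
  · intro a b ha hb
    have ha' : (a : Int) < n * 2 - 1 := by omega
    have hb' : (b : Int) < n * 2 - 1 := by omega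
    rw [pvCell_foldl_step n s _ _ (pvRect_zero s)
        (fun p hp => by have := pvPairsA_bounds n p hp; omega) a b ha hb,
      pvCell_foldl_step n s _ _ (pvRect_zero s)
        (fun p hp => by have := pvPairsB_bounds n p hp; omega) a b ha hb]
    rw [if_pos (pvPairsA_mem n a b ha' hb'), if_pos (pvPairsB_mem n a b ha' hb')]
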